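-- pv_equiv track=rewrite | github.com/OSU-CS-325/Project_Four_TSP | Alg04_Nearest_Neighbor/nearestNeighbor.py | mstToAdjList
-- ===== SOURCE A (Python) =====
-- def mstToAdjList(adjMatrix, mst):
-- 	adjList = {}
-- 	for i in range(0, len(adjMatrix)):
-- 		adjV = {}
-- 		for j in range(0, len(mst)):
-- 			if i == mst[j]:
-- 				adjV[j] = adjMatrix[i][j]
-- 		adjList[i] = adjV
-- 	return adjList
-- ===== SOURCE B (Python) =====
-- def mstToAdjList(adjMatrix, mst):
-- 	groups = {}
-- 	for j, v in enumerate(mst):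
-- 		groups.setdefault(v, []).append(j)
-- 	return {i: {j: adjMatrix[i][j] for j in groups.get(i, [])}
-- 	        for i in range(len(adjMatrix))}
-- ===== Notes on version B (the rewrite author's own statement) =====
-- stated objective: faster
-- what changed: Instead of scanning all of mst once per matrix row (nested loops), B groups the indices j by mst[j] into a dict in one pass over mst and then assembles each row's adjacency dict from its own group only.
import Mathlib
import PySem

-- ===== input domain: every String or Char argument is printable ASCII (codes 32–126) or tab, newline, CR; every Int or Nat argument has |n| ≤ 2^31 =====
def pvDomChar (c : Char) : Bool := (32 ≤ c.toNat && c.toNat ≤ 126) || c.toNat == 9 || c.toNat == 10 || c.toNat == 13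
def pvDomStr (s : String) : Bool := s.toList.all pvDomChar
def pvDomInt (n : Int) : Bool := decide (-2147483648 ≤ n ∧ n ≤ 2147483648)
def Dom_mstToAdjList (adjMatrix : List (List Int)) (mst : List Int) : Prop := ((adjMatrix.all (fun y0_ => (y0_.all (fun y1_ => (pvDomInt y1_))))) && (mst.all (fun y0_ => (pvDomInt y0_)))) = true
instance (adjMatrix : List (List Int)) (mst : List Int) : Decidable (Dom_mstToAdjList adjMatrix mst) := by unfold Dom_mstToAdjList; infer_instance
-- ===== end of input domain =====

-- B replaces A's O(n·m) double scan by one pass grouping j by mst[j] into a dict, then per-row assembly (faster, asymptotic).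


-- ===== PORT A =====
-- literal transliteration of A: for i in range(len(adjMatrix)): for j in range(len(mst)): if i == mst[j] …
-- adjMatrix[i][j] may raise in Python when j is past row i's end; pyGetD is exact there under Pre_.
def mstToAdjList (adjMatrix : List (List Int)) (mst : List Int) : List (Int × List (Int × Int)) :=
  ((PySem.List.pyRange 0 adjMatrix.length 1).foldl
    (fun adjList i =>
      adjList.insert i
        ((PySem.List.pyRange 0 mst.length 1).foldl
          (fun adjV j =>
            if i == PySem.List.pyGetD mst j 0 then
              adjV.insert j (PySem.List.pyGetD (PySem.List.pyGetD adjMatrix i []) j 0)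
            else adjV)
          (PySem.Dict.empty : PySem.Dict Int Int)))
    (PySem.Dict.empty : PySem.Dict Int (PySem.Dict Int Int))).items.map (fun p => (p.1, p.2.items))

-- ===== PORT B =====
-- literal transliteration of B: one enumerate pass builds groups (setdefault+append = modify with default []),
-- then a dict comprehension over range(len(adjMatrix)); its keys i are fresh, so it is built as the pair list directly.
def mstToAdjList_alt (adjMatrix : List (List Int)) (mst : List Int) : List (Int × List (Int × Int)) :=
  let groups : PySem.Dict Int (List Int) :=
    (PySem.List.enumerate mst 0).foldl (fun g p => g.modify p.2 [] (fun l => l ++ [p.1])) PySem.Dict.empty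
  (PySem.List.pyRange 0 adjMatrix.length 1).foldl
    (fun acc i =>
      acc ++ [(i, (groups.getD i []).map
        (fun j => (j, PySem.List.pyGetD (PySem.List.pyGetD adjMatrix i []) j 0)))]) []

-- ===== PRECONDITION & SPEC =====
-- Pre_ excludes exactly the inputs where Python A raises IndexError: some j with mst[j] == i but j past the end of row i.
def Pre_mstToAdjList (adjMatrix : List (List Int)) (mst : List Int) : Prop :=
  ∀ i < adjMatrix.length, ∀ j < mst.length, mst.getD j 0 = (i : Int) → j < (adjMatrix.getD i []).length
instance (adjMatrix : List (List Int)) (mst : List Int) : Decidable (Pre_mstToAdjList adjMatrix mst) := by unfold Pre_mstToAdjList; infer_instance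
def pvWitness_mstToAdjList : List (List Int) × List Int := ([[0, 5], [7, 0]], [1, 0])

def Spec_mstToAdjList (adjMatrix : List (List Int)) (mst : List Int) (out : List (Int × List (Int × Int))) : Prop := out = mstToAdjList_alt adjMatrix mst
instance (adjMatrix : List (List Int)) (mst : List Int) (out : List (Int × List (Int × Int))) : Decidable (Spec_mstToAdjList adjMatrix mst out) := by unfold Spec_mstToAdjList; infer_instance

-- ===== CLAIM (what is proved, stated in full; the proofs are below) =====
def Claim_equal_mstToAdjList : Prop := ∀ (adjMatrix : List (List Int)) (mst : List Int), Dom_mstToAdjList adjMatrix mst → Pre_mstToAdjList adjMatrix mst → Spec_mstToAdjList adjMatrix mst (mstToAdjList adjMatrix mst)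

-- ===== LEMMAS AND PROOFS =====

-- an index loop over range(len xs) reading xs[j] is the fold over enumerate xs
theorem foldl_pyRange_eq_foldl_enumerate {α β : Type} (xs l : List α) (d : α) (s : Nat)
    (hl : l = xs.drop s) (f : β → Int → α → β) (init : β) :
    (PySem.List.pyRange (s : Int) (xs.length : Int) 1).foldl
        (fun acc j => f acc j (PySem.List.pyGetD xs j d)) init
      = (PySem.List.enumerate l (s : Int)).foldl (fun acc p => f acc p.1 p.2) init := by
  induction l generalizing s init with
  | nil =>
    have hs : (xs.length : Int) ≤ (s : Int) := by
      have := congrArg List.length hl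
      simp at this; omega
    rw [PySem.List.pyRange_one_eq_nil hs]
    simp [PySem.List.enumerate_nil]
  | cons a t ih =>
    have hs : s < xs.length := by
      by_contra h
      rw [List.drop_eq_nil_of_le (by omega)] at hl
      exact List.cons_ne_nil a t hl
    have hget? : xs[s]? = some a := by
      have h0 : (List.drop s xs)[0]? = some a := by rw [← hl]; simp
      simpa [List.getElem?_drop] using h0
    have hget : xs.getD s d = a := by simp [List.getD, hget?]
    have ht : t = xs.drop (s + 1) := by
      have h0 : (List.drop s xs).tail = t := by rw [← hl]; simp
      exact (by simpa [List.tail_drop] using h0 : List.drop (s + 1) xs = t).symm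
    rw [PySem.List.pyRange_one_cons (by exact_mod_cast hs), PySem.List.enumerate_cons]
    simp only [List.foldl_cons, PySem.List.pyGetD_natCast, hget]
    have hc : ((s : Int) + 1) = ((s + 1 : Nat) : Int) := by push_cast; ring
    rw [hc]
    exact ih (s + 1) ht _

-- inner A loop: a conditional fresh-key insert fold over a fst-increasing pair list is filter-then-map
theorem items_foldl_insert_pairs {nu : Type} (i : Int) (f : Int × Int → nu) (L : List (Int × Int))
    (d : PySem.Dict Int nu)
    (hd : ∀ p ∈ L, ∀ k ∈ d.keys, k < p.1)
    (hL : L.Pairwise (fun p q => p.1 < q.1)) :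
    (L.foldl (fun d p => if i == p.2 then d.insert p.1 (f p) else d) d).items
      = d.items ++ (L.filter (fun p => i == p.2)).map (fun p => (p.1, f p)) := by
  induction L generalizing d with
  | nil => simp
  | cons a t ih =>
    cases hL with
    | cons ha hL' =>
    simp only [List.foldl_cons, List.filter_cons]
    by_cases hc : (i == a.2)
    · have hnc : d.contains a.1 = false := by
        rw [PySem.Dict.contains_eq_decide_mem_keys]
        simp only [decide_eq_false_iff_not]
        intro hm
        exact absurd (hd a (by simp) a.1 hm) (lt_irrefl a.1)
      rw [hc, if_pos rfl, ih _ ?_ hL']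
      · rw [PySem.Dict.items_insert_of_not_contains d _ hnc]
        simp
      · intro p hp k hk
        rw [PySem.Dict.keys_insert_of_not_contains d _ hnc] at hk
        rcases List.mem_append.mp hk with h | h
        · exact lt_trans (hd a (by simp) k h) (ha p hp)
        · simp at h; subst h; exact ha p hp
    · rw [if_neg hc, ih _ (fun p hp => hd p (by simp [hp])) hL']
      simp [hc]

-- B groups loop: getD of the setdefault/append fold collects the firsts of matching pairs, in order
theorem getD_foldl_modify_append (L : List (Int × Int)) (g : PySem.Dict Int (List Int)) (i : Int) :
    (L.foldl (fun g p => g.modify p.2 [] (fun l => l ++ [p.1])) g).getD i []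
      = g.getD i [] ++ (L.filter (fun p => p.2 == i)).map (fun p => p.1) := by
  induction L generalizing g with
  | nil => simp
  | cons a t ih =>
    simp only [List.foldl_cons, List.filter_cons]
    rw [ih]
    by_cases h : a.2 = i
    · subst h
      rw [PySem.Dict.getD_modify _ _ _ _ _, if_pos rfl]
      simp
    · rw [PySem.Dict.getD_modify _ _ _ _ _, if_neg (fun hh => h hh.symm)]
      simp [h]

-- outer A loop: inserting fresh increasing keys over a range appends the items in range order
theorem items_foldl_insert_range {nu : Type} (f : Int → nu) (b : Int) (n : Nat) :
    ∀ (a : Int) (d : PySem.Dict Int nu), (b - a).toNat = n → (∀ k ∈ d.keys, k < a) →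
    ((PySem.List.pyRange a b 1).foldl (fun d i => d.insert i (f i)) d).items
      = d.items ++ (PySem.List.pyRange a b 1).map (fun i => (i, f i)) := by
  induction n with
  | zero =>
    intro a d hn _
    rw [PySem.List.pyRange_one_eq_nil (by omega)]
    simp
  | succ m ih =>
    intro a d hn hd
    have hab : a < b := by omega
    have hnc : d.contains a = false := by
      rw [PySem.Dict.contains_eq_decide_mem_keys]
      simp only [decide_eq_false_iff_not]
      intro hm
      exact absurd (hd a hm) (lt_irrefl a)
    rw [PySem.List.pyRange_one_cons hab]
    simp only [List.foldl_cons, List.map_cons]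
    rw [ih (a + 1) _ (by omega) ?_]
    · rw [PySem.Dict.items_insert_of_not_contains d _ hnc]
      simp
    · intro k hk
      rw [PySem.Dict.keys_insert_of_not_contains d _ hnc] at hk
      rcases List.mem_append.mp hk with h | h
      · exact lt_trans (hd k h) (by omega)
      · simp at h; omega

-- the fst components of enumerate are strictly increasing
theorem pairwise_fst_enumerate {al : Type} (xs : List al) (s : Int) :
    (PySem.List.enumerate xs s).Pairwise (fun p q => p.1 < q.1) := by
  have h := PySem.List.pairwise_lt_pyRange_one s (s + xs.length)
  rw [← PySem.List.map_fst_enumerate xs s] at h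
  exact (List.pairwise_map).mp h

-- ===== VERDICT (by name: the statement is the Claim_ definition above) =====
theorem mstToAdjList_spec : Claim_equal_mstToAdjList := by
  intro adjMatrix mst _ _
  unfold Spec_mstToAdjList mstToAdjList mstToAdjList_alt
  rw [PySem.List.foldl_append_singleton_eq_map]
  rw [items_foldl_insert_range _ (adjMatrix.length : Int) adjMatrix.length 0 PySem.Dict.empty
      (by simp) (by simp [PySem.Dict.keys_empty])]
  have hempty : (PySem.Dict.empty : PySem.Dict Int (PySem.Dict Int Int)).items = [] := rfl
  rw [hempty, List.nil_append, List.map_map]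
  apply List.map_congr_left
  intro i hi
  simp only [Function.comp]
  -- A's inner index loop as a fold over enumerate mst
  have h1 := foldl_pyRange_eq_foldl_enumerate mst mst 0 0 rfl
      (fun acc j x => if i == x then acc.insert j (PySem.List.pyGetD (PySem.List.pyGetD adjMatrix i []) j 0) else acc)
      (PySem.Dict.empty : PySem.Dict Int Int)
  simp only [Nat.cast_zero] at h1
  rw [h1]
  rw [items_foldl_insert_pairs i (fun p => PySem.List.pyGetD (PySem.List.pyGetD adjMatrix i []) p.1 0)
      (PySem.List.enumerate mst 0) PySem.Dict.empty
      (by simp [PySem.Dict.keys_empty]) (pairwise_fst_enumerate mst 0)]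
  rw [getD_foldl_modify_append (PySem.List.enumerate mst 0) PySem.Dict.empty i]
  simp only [PySem.Dict.getD_empty, List.nil_append, List.map_map]
  have hfil : (PySem.List.enumerate mst 0).filter (fun p => p.2 == i)
      = (PySem.List.enumerate mst 0).filter (fun p => i == p.2) := by
    apply List.filter_congr
    intro p _
    show decide (p.2 = i) = decide (i = p.2)
    exact decide_eq_decide.mpr ⟨Eq.symm, Eq.symm⟩
  rw [hfil]
  have hde : (PySem.Dict.empty : PySem.Dict Int Int).items = [] := rfl
  rw [hde, List.nil_append]
  rfl
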